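-- pv_equiv track=rewrite | github.com/lmorchard/decafclaw | src/decafclaw/compaction.py | _split_into_turns
-- ===== SOURCE A (Python) =====
-- def _split_into_turns(messages: list[dict]) -> list[list[dict]]:
--     """Split a flat message list into turns.
--
--     A turn starts with a user or vault_retrieval message and includes
--     everything until the next turn boundary. vault_retrieval is treated
--     as a turn start because it's injected before the user message it
--     belongs to.
--     """
--     turns = []
--     current_turn = []
--     for msg in messages:
--         role = msg.get("role")
--         if role in ("user", "vault_retrieval") and current_turn:
--             turns.append(current_turn)
--             current_turn = []
--         current_turn.append(msg)
--     if current_turn: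
--         turns.append(current_turn)
--     return turns
-- ===== SOURCE B (Python) =====
-- def _split_into_turns(messages: list[dict]) -> list[list[dict]]:
--     """Split a flat message list into turns (boundary-scan decomposition).
--
--     Instead of growing a current_turn accumulator, find each turn's end
--     by scanning forward to the next boundary message and slice it out.
--     """
--     turns = []
--     start = 0
--     n = len(messages)
--     while start < n:
--         end = start + 1
--         while end < n and messages[end].get("role") not in ("user", "vault_retrieval"):
--             end += 1
--         turns.append(messages[start:end])
--         start = end
--     return turns
-- ===== Notes on version B (the rewrite author's own statement) =====
-- stated objective: alternative
-- what changed: Replaced the incremental current_turn accumulator with a boundary-scan: each turn is located by advancing an index to the next user/vault_retrieval message and sliced out of the list directly.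
import Mathlib
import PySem

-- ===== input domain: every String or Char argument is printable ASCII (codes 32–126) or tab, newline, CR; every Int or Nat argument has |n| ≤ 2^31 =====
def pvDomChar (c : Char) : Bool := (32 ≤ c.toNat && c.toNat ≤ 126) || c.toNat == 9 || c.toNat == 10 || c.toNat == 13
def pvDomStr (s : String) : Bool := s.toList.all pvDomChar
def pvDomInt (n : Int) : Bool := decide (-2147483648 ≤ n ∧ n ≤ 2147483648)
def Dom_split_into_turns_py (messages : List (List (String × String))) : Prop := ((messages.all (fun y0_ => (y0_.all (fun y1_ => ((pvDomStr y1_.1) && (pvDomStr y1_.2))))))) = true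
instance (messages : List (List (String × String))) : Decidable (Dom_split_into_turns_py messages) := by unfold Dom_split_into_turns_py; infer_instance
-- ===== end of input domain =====

-- ===== PORT A =====
-- msg.get("role"): assoc-list dict lookup = first matching key (exact for the dict convention)
def pvRole (msg : List (String × String)) : Option String :=
  (msg.find? (fun kv => kv.1 == "role")).map (fun kv => kv.2)

-- role in ("user", "vault_retrieval")
def pvIsBoundary (msg : List (String × String)) : Bool :=
  pvRole msg == some "user" || pvRole msg == some "vault_retrieval"

-- the for-loop of A, state = (turns, current_turn)
def pvAGo (turns : List (List (List (String × String)))) (current : List (List (String × String))) :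
    List (List (String × String)) → List (List (List (String × String))) × List (List (String × String))
  | [] => (turns, current)
  | msg :: rest =>
    if pvIsBoundary msg && !current.isEmpty then pvAGo (turns ++ [current]) [msg] rest
    else pvAGo turns (current ++ [msg]) rest

def split_into_turns_py (messages : List (List (String × String))) : List (List (List (String × String))) :=
  let r := pvAGo [] [] messages
  if !r.2.isEmpty then r.1 ++ [r.2] else r.1

-- ===== PORT B =====
-- B's boundary scan: the inner while loop that advances `end` to the next boundary is the
-- span of non-boundary messages after the turn head; the slice messages[start:end] is the
-- head consed onto that span.
def pvBGo : List (List (String × String)) → List (List (List (String × String)))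
  | [] => []
  | m :: rest =>
      (m :: rest.takeWhile (fun x => !pvIsBoundary x)) ::
        pvBGo (rest.dropWhile (fun x => !pvIsBoundary x))
termination_by l => l.length
decreasing_by
  simp only [List.length_cons]
  exact Nat.lt_succ_of_le (List.length_dropWhile_le _ _)

def split_into_turns_py_alt (messages : List (List (String × String))) : List (List (List (String × String))) :=
  pvBGo messages

-- ===== PRECONDITION & SPEC =====
def Spec_split_into_turns_py (messages : List (List (String × String))) (out : List (List (List (String × String)))) : Prop := out = split_into_turns_py_alt messages
instance (messages : List (List (String × String))) (out : List (List (List (String × String)))) : Decidable (Spec_split_into_turns_py messages out) := by unfold Spec_split_into_turns_py; infer_instance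

-- ===== CLAIM (what is proved, stated in full; the proofs are below) =====
def Claim_equal_split_into_turns_py : Prop := ∀ (messages : List (List (String × String))), Dom_split_into_turns_py messages → Spec_split_into_turns_py messages (split_into_turns_py messages)

-- ===== LEMMAS AND PROOFS =====
def pvFinish (r : List (List (List (String × String))) × List (List (String × String))) :
    List (List (List (String × String))) :=
  if !r.2.isEmpty then r.1 ++ [r.2] else r.1

theorem pvFinish_aGo (rest : List (List (String × String))) :
    ∀ (turns : List (List (List (String × String)))) (current : List (List (String × String))),
      current ≠ [] →
      pvFinish (pvAGo turns current rest) =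
        turns ++ (current ++ rest.takeWhile (fun x => !pvIsBoundary x)) ::
          pvBGo (rest.dropWhile (fun x => !pvIsBoundary x)) := by
  induction rest with
  | nil =>
      intro turns current hc
      simp [pvAGo, pvFinish, pvBGo, List.isEmpty_iff, hc]
  | cons m rest ih =>
      intro turns current hc
      by_cases hb : pvIsBoundary m
      · have hce : (!current.isEmpty) = true := by
          simp [List.isEmpty_iff, hc]
        simp only [pvAGo, hb, Bool.true_and]
        rw [if_pos hce, ih (turns ++ [current]) [m] (by simp)]
        simp [pvBGo, hb, List.takeWhile, List.dropWhile]
      · simp only [pvAGo, hb, Bool.false_and]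
        rw [if_neg (by simp), ih turns (current ++ [m]) (by simp)]
        simp [List.takeWhile, List.dropWhile, hb]


-- ===== VERDICT (by name: the statement is the Claim_ definition above) =====
theorem split_into_turns_py_spec : Claim_equal_split_into_turns_py := by
  intro messages _
  unfold Spec_split_into_turns_py split_into_turns_py split_into_turns_py_alt
  cases messages with
  | nil => simp [pvAGo, pvBGo]
  | cons m rest =>
      have h0 : pvAGo [] [] (m :: rest) = pvAGo [] [m] rest := by
        simp [pvAGo]
      show pvFinish (pvAGo [] [] (m :: rest)) = pvBGo (m :: rest)
      rw [h0, pvFinish_aGo rest [] [m] (by simp)]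
      simp [pvBGo]
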